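-- pv_equiv track=rewrite | github.com/ArcticCoderGuy/Mikrobot-FastVersion | universal_asset_pip_converter.py | _pattern_based_classification
-- ===== SOURCE A (Python) =====
-- def _pattern_based_classification(symbol: str) -> str:
--     """Pattern-based asset classification"""
--     symbol_upper = symbol.upper()
--
--     # FOREX patterns
--     forex_currencies = ['USD', 'EUR', 'GBP', 'JPY', 'CHF', 'AUD', 'CAD', 'NZD', 'SEK', 'NOK', 'DKK']
--     if len(symbol_upper) == 6 and any(curr in symbol_upper for curr in forex_currencies):
--         return 'FOREX'
--
--     # CRYPTO patterns
--     crypto_patterns = ['BTC', 'ETH', 'XRP', 'ADA', 'DOT', 'LTC', 'LINK', 'BCH', 'XLM', 'EOS', 'TRX', 'BNB', 'SOL', 'AVAX', 'MATIC', 'DOGE', 'ATOM']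
--     if any(crypto in symbol_upper for crypto in crypto_patterns):
--         return 'CFD_CRYPTO'
--
--     # METALS patterns
--     metals_patterns = ['XAU', 'XAG', 'XPT', 'XPD', 'GOLD', 'SILVER', 'PLATINUM', 'PALLADIUM']
--     if any(metal in symbol_upper for metal in metals_patterns):
--         return 'CFD_METALS'
--
--     # INDICES patterns
--     indices_patterns = ['US30', 'US500', 'USTEC', 'GER40', 'UK100', 'FRA40', 'DAX', 'FTSE', 'CAC', 'IBEX', 'MIB', 'AEX', 'SMI', 'ASX', 'N225', 'HSI']
--     if any(index in symbol_upper for index in indices_patterns):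
--         return 'CFD_INDICES'
--
--     # ENERGIES patterns
--     energy_patterns = ['OIL', 'NGAS', 'CRUDE', 'BRENT', 'WTI', 'NATGAS', 'HEATING', 'GASOLINE']
--     if any(energy in symbol_upper for energy in energy_patterns):
--         return 'CFD_ENERGIES'
--
--     # AGRICULTURAL patterns
--     agri_patterns = ['WHEAT', 'CORN', 'SOYBEANS', 'RICE', 'COFFEE', 'COCOA', 'SUGAR', 'COTTON', 'LUMBER', 'CATTLE', 'HOGS']
--     if any(agri in symbol_upper for agri in agri_patterns):
--         return 'CFD_AGRICULTURAL'
--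
--     # BONDS patterns
--     bond_patterns = ['10Y', '30Y', '2Y', '5Y']
--     if any(bond in symbol_upper for bond in bond_patterns):
--         return 'CFD_BONDS'
--
--     # ETF patterns
--     etf_patterns = ['SPY', 'QQQ', 'IWM', 'VTI', 'VOO', 'VEA', 'VWO', 'BND', 'VNQ', 'GLD', 'SLV', 'USO', 'TLT', 'HYG', 'LQD', 'EFA', 'EEM', 'XLF']
--     if symbol_upper in etf_patterns:
--         return 'CFD_ETFS'
--
--     # Default to shares if stock-like pattern
--     if len(symbol_upper) <= 5 and symbol_upper.isalpha():
--         return 'CFD_SHARES'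
--
--     # Ultimate fallback
--     return 'CFD_SHARES'
-- ===== SOURCE B (Python) =====
-- # Exhaustive scan over one flat pattern->priority list, then pick the best
-- # (lowest) matched priority; no early-exit cascade.
--
-- _CATS = ['FOREX', 'CFD_CRYPTO', 'CFD_METALS', 'CFD_INDICES', 'CFD_ENERGIES',
--          'CFD_AGRICULTURAL', 'CFD_BONDS', 'CFD_ETFS', 'CFD_SHARES']
--
-- _FLAT = (
--     [(p, 0) for p in ['USD', 'EUR', 'GBP', 'JPY', 'CHF', 'AUD', 'CAD', 'NZD', 'SEK', 'NOK', 'DKK']]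
--   + [(p, 1) for p in ['BTC', 'ETH', 'XRP', 'ADA', 'DOT', 'LTC', 'LINK', 'BCH', 'XLM', 'EOS', 'TRX', 'BNB', 'SOL', 'AVAX', 'MATIC', 'DOGE', 'ATOM']]
--   + [(p, 2) for p in ['XAU', 'XAG', 'XPT', 'XPD', 'GOLD', 'SILVER', 'PLATINUM', 'PALLADIUM']]
--   + [(p, 3) for p in ['US30', 'US500', 'USTEC', 'GER40', 'UK100', 'FRA40', 'DAX', 'FTSE', 'CAC', 'IBEX', 'MIB', 'AEX', 'SMI', 'ASX', 'N225', 'HSI']]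
--   + [(p, 4) for p in ['OIL', 'NGAS', 'CRUDE', 'BRENT', 'WTI', 'NATGAS', 'HEATING', 'GASOLINE']]
--   + [(p, 5) for p in ['WHEAT', 'CORN', 'SOYBEANS', 'RICE', 'COFFEE', 'COCOA', 'SUGAR', 'COTTON', 'LUMBER', 'CATTLE', 'HOGS']]
--   + [(p, 6) for p in ['10Y', '30Y', '2Y', '5Y']]
--   + [(p, 7) for p in ['SPY', 'QQQ', 'IWM', 'VTI', 'VOO', 'VEA', 'VWO', 'BND', 'VNQ', 'GLD', 'SLV', 'USO', 'TLT', 'HYG', 'LQD', 'EFA', 'EEM', 'XLF']]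
-- )
--
--
-- def _matches(pat, prio, u):
--     if prio == 0:          # FOREX needs the 6-char shape
--         return len(u) == 6 and pat in u
--     if prio == 7:          # ETFs match by exact ticker
--         return u == pat
--     return pat in u        # everything else is a substring hit
--
--
-- def _pattern_based_classification(symbol: str) -> str:
--     u = symbol.upper()
--     hits = [prio for pat, prio in _FLAT if _matches(pat, prio, u)]
--     return _CATS[min(hits, default=8)]
-- ===== Notes on version B (the rewrite author's own statement) =====
-- stated objective: alternative
-- what changed: Instead of A's short-circuiting eight-branch if-cascade, B scans one flat (pattern, priority) list exhaustively, collects ALL matching priorities, and returns the category of the minimum matched priority (default 8 = CFD_SHARES), which coincides with A's first-match-wins order.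
import Mathlib
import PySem

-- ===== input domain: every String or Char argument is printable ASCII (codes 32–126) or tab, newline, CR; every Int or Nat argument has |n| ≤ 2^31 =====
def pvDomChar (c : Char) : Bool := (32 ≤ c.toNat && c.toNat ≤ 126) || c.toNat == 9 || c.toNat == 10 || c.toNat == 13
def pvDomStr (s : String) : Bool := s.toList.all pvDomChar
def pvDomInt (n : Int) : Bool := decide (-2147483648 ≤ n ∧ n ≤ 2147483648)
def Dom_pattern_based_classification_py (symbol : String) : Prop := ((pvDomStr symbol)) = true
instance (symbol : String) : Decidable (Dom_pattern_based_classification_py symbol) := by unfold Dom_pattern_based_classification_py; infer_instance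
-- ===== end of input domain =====

-- B replaces A's short-circuiting if-cascade by one exhaustive scan of a flat
-- (pattern, priority) list, returning the category of the minimum matched priority
-- (objective: alternative; same asymptotic cost).

-- ===== PORT A =====
def pattern_based_classification_py (symbol : String) : String :=
  let symbol_upper := PySem.Str.upper symbol
  let forex_currencies := ["USD", "EUR", "GBP", "JPY", "CHF", "AUD", "CAD", "NZD", "SEK", "NOK", "DKK"]
  if decide (PySem.Str.len symbol_upper = 6) && forex_currencies.any (fun curr => PySem.Str.isIn curr symbol_upper) then "FOREX"
  else
  let crypto_patterns := ["BTC", "ETH", "XRP", "ADA", "DOT", "LTC", "LINK", "BCH", "XLM", "EOS", "TRX", "BNB", "SOL", "AVAX", "MATIC", "DOGE", "ATOM"]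
  if crypto_patterns.any (fun p => PySem.Str.isIn p symbol_upper) then "CFD_CRYPTO"
  else
  let metals_patterns := ["XAU", "XAG", "XPT", "XPD", "GOLD", "SILVER", "PLATINUM", "PALLADIUM"]
  if metals_patterns.any (fun p => PySem.Str.isIn p symbol_upper) then "CFD_METALS"
  else
  let indices_patterns := ["US30", "US500", "USTEC", "GER40", "UK100", "FRA40", "DAX", "FTSE", "CAC", "IBEX", "MIB", "AEX", "SMI", "ASX", "N225", "HSI"]
  if indices_patterns.any (fun p => PySem.Str.isIn p symbol_upper) then "CFD_INDICES"
  else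
  let energy_patterns := ["OIL", "NGAS", "CRUDE", "BRENT", "WTI", "NATGAS", "HEATING", "GASOLINE"]
  if energy_patterns.any (fun p => PySem.Str.isIn p symbol_upper) then "CFD_ENERGIES"
  else
  let agri_patterns := ["WHEAT", "CORN", "SOYBEANS", "RICE", "COFFEE", "COCOA", "SUGAR", "COTTON", "LUMBER", "CATTLE", "HOGS"]
  if agri_patterns.any (fun p => PySem.Str.isIn p symbol_upper) then "CFD_AGRICULTURAL"
  else
  let bond_patterns := ["10Y", "30Y", "2Y", "5Y"]
  if bond_patterns.any (fun p => PySem.Str.isIn p symbol_upper) then "CFD_BONDS"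
  else
  let etf_patterns := ["SPY", "QQQ", "IWM", "VTI", "VOO", "VEA", "VWO", "BND", "VNQ", "GLD", "SLV", "USO", "TLT", "HYG", "LQD", "EFA", "EEM", "XLF"]
  if etf_patterns.contains symbol_upper then "CFD_ETFS"
  else
  if decide (PySem.Str.len symbol_upper ≤ 5) && PySem.Str.strIsalpha symbol_upper then "CFD_SHARES"
  else "CFD_SHARES"

-- ===== PORT B =====
def pvCats : List String :=
  ["FOREX", "CFD_CRYPTO", "CFD_METALS", "CFD_INDICES", "CFD_ENERGIES",
   "CFD_AGRICULTURAL", "CFD_BONDS", "CFD_ETFS", "CFD_SHARES"]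

def pvFlat : List (String × Nat) :=
    (["USD", "EUR", "GBP", "JPY", "CHF", "AUD", "CAD", "NZD", "SEK", "NOK", "DKK"].map (fun p => (p, 0)))
  ++ (["BTC", "ETH", "XRP", "ADA", "DOT", "LTC", "LINK", "BCH", "XLM", "EOS", "TRX", "BNB", "SOL", "AVAX", "MATIC", "DOGE", "ATOM"].map (fun p => (p, 1)))
  ++ (["XAU", "XAG", "XPT", "XPD", "GOLD", "SILVER", "PLATINUM", "PALLADIUM"].map (fun p => (p, 2)))
  ++ (["US30", "US500", "USTEC", "GER40", "UK100", "FRA40", "DAX", "FTSE", "CAC", "IBEX", "MIB", "AEX", "SMI", "ASX", "N225", "HSI"].map (fun p => (p, 3)))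
  ++ (["OIL", "NGAS", "CRUDE", "BRENT", "WTI", "NATGAS", "HEATING", "GASOLINE"].map (fun p => (p, 4)))
  ++ (["WHEAT", "CORN", "SOYBEANS", "RICE", "COFFEE", "COCOA", "SUGAR", "COTTON", "LUMBER", "CATTLE", "HOGS"].map (fun p => (p, 5)))
  ++ (["10Y", "30Y", "2Y", "5Y"].map (fun p => (p, 6)))
  ++ (["SPY", "QQQ", "IWM", "VTI", "VOO", "VEA", "VWO", "BND", "VNQ", "GLD", "SLV", "USO", "TLT", "HYG", "LQD", "EFA", "EEM", "XLF"].map (fun p => (p, 7)))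

def pvMatches (pat : String) (prio : Nat) (u : String) : Bool :=
  if prio = 0 then decide (PySem.Str.len u = 6) && PySem.Str.isIn pat u
  else if prio = 7 then u == pat
  else PySem.Str.isIn pat u

-- `min(hits, default=8)` ported as a fold of `min` from 8 (exact: every hit is ≤ 7);
-- `_CATS[i]` ported as `getD` (exact: the index is always < 9).
def pattern_based_classification_py_alt (symbol : String) : String :=
  let u := PySem.Str.upper symbol
  let hits := (pvFlat.filter (fun pk => pvMatches pk.1 pk.2 u)).map Prod.snd
  pvCats.getD (hits.foldl min 8) "CFD_SHARES"

-- ===== PRECONDITION & SPEC =====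
def Spec_pattern_based_classification_py (symbol : String) (out : String) : Prop := out = pattern_based_classification_py_alt symbol
instance (symbol : String) (out : String) : Decidable (Spec_pattern_based_classification_py symbol out) := by unfold Spec_pattern_based_classification_py; infer_instance

-- ===== CLAIM (what is proved, stated in full; the proofs are below) =====
def Claim_equal_pattern_based_classification_py : Prop := ∀ (symbol : String), Dom_pattern_based_classification_py symbol → Spec_pattern_based_classification_py symbol (pattern_based_classification_py symbol)

-- ===== LEMMAS AND PROOFS =====

-- one homogeneous-priority group contributes `min b i` to the fold iff some pattern of it matches
theorem pv_group_fold (u : String) (i : Nat) :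
    ∀ (ps : List String) (b : Nat),
      (((ps.map (fun p => (p, i))).filter (fun pk => pvMatches pk.1 pk.2 u)).map Prod.snd).foldl min b
        = if ps.any (fun p => pvMatches p i u) then min b i else b := by
  intro ps
  induction ps with
  | nil => intro b; simp
  | cons p ps ih =>
    intro b
    by_cases h : pvMatches p i u
    · simp [h, ih]
    · simp [h, ih]

-- pull a condition common to a whole group out of `any`
theorem pv_any_and (a : Bool) (g : String → Bool) (L : List String) :
    L.any (fun p => a && g p) = (a && L.any g) := by
  cases a <;> simp

-- `pvMatches` at each literal priority
theorem pvMatches_zero (pat u : String) : pvMatches pat 0 u = (decide (PySem.Str.len u = 6) && PySem.Str.isIn pat u) := rfl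
theorem pvMatches_one (pat u : String) : pvMatches pat 1 u = PySem.Str.isIn pat u := rfl
theorem pvMatches_two (pat u : String) : pvMatches pat 2 u = PySem.Str.isIn pat u := rfl
theorem pvMatches_three (pat u : String) : pvMatches pat 3 u = PySem.Str.isIn pat u := rfl
theorem pvMatches_four (pat u : String) : pvMatches pat 4 u = PySem.Str.isIn pat u := rfl
theorem pvMatches_five (pat u : String) : pvMatches pat 5 u = PySem.Str.isIn pat u := rfl
theorem pvMatches_six (pat u : String) : pvMatches pat 6 u = PySem.Str.isIn pat u := rfl
theorem pvMatches_seven (pat u : String) : pvMatches pat 7 u = (u == pat) := rfl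

-- with the eight match conditions abstracted as booleans, A's cascade equals B's min-of-matches
theorem pv_bridge (c0 c1 c2 c3 c4 c5 c6 c7 : Bool) :
    (if c0 = true then "FOREX"
     else if c1 = true then "CFD_CRYPTO"
     else if c2 = true then "CFD_METALS"
     else if c3 = true then "CFD_INDICES"
     else if c4 = true then "CFD_ENERGIES"
     else if c5 = true then "CFD_AGRICULTURAL"
     else if c6 = true then "CFD_BONDS"
     else if c7 = true then "CFD_ETFS"
     else "CFD_SHARES")
    = pvCats.getD (List.foldl (fun a ci => if ci.2 = true then min a ci.1 else a) 8
        [(0, c0), (1, c1), (2, c2), (3, c3), (4, c4), (5, c5), (6, c6), (7, c7)]) "CFD_SHARES" := by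
  revert c0 c1 c2 c3 c4 c5 c6 c7
  decide

-- ===== VERDICT (by name: the statement is the Claim_ definition above) =====
set_option maxHeartbeats 2000000 in
theorem pattern_based_classification_py_spec : Claim_equal_pattern_based_classification_py := by
  intro symbol _
  show _ = _
  simp only [pattern_based_classification_py, pattern_based_classification_py_alt, pvFlat]
  simp only [List.filter_append, List.map_append, List.foldl_append]
  simp only [pv_group_fold]
  simp only [pvMatches_zero, pvMatches_one, pvMatches_two, pvMatches_three, pvMatches_four,
    pvMatches_five, pvMatches_six, pvMatches_seven, pv_any_and, ite_self,
    List.contains_eq_any_beq]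
  rw [pv_bridge]
  simp only [List.foldl]
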